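-- pv_equiv track=rewrite | github.com/UcoreAI/sendora-ocr-production | backend/html_template_generator.py | generate_checkbox_group
-- ===== SOURCE A (Python) =====
-- def generate_checkbox_group(group_type: str, selected_value: str) -> str:
--     """Generate checkbox group for a specific type"""
--
--     checkbox_options = {
--         'thickness': ['37mm', '43mm', '48mm', 'Others'],
--         'type': ['S/L', 'D/L', 'Unequal D/L', 'Others'],
--         'core': ['Honeycomb', 'Solid Tubular Core', 'Solid Timber', 'Metal Skeleton'],
--         'edging': ['NA Lipping', 'ABS Edging', 'No Edging'],
--         'decorative': ['T-bar', 'Groove Line']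
--     }
--
--     options = checkbox_options.get(group_type, [])
--     selected_lower = selected_value.lower()
--
--     html = '<div class="checkbox-group">'
--
--     for option in options:
--         # Check if this option should be marked
--         is_checked = False
--         if selected_lower:
--             if group_type == 'thickness' and option.replace('mm', '') in selected_lower:
--                 is_checked = True
--             elif group_type == 'type' and option.lower() in selected_lower:
--                 is_checked = True
--             elif group_type == 'core' and any(word in selected_lower for word in option.lower().split()):
--                 is_checked = True
--             elif group_type == 'edging' and any(word in selected_lower for word in option.lower().split()):
--                 is_checked = True
--             elif group_type == 'decorative' and option.lower().replace('-', '') in selected_lower.replace('-', ''):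
--                 is_checked = True
--
--         checkbox_class = 'checkbox checked' if is_checked else 'checkbox'
--
--         html += f"""
--             <div class="checkbox-item">
--                 <div class="{checkbox_class}"></div>
--                 <span class="checkbox-label">{option}</span>
--             </div>
--         """
--
--     html += '</div>'
--     return html
-- ===== SOURCE B (Python) =====
-- # Table-driven rewrite: per-group (label, needles) data precomputed, selected string
-- # normalised once, then one uniform membership loop joined at the end.
--
-- _NEEDLE_TABLE = {
--     'thickness': [('37mm', ['37']), ('43mm', ['43']), ('48mm', ['48']),
--                   ('Others', ['Others'])],
--     'type': [('S/L', ['s/l']), ('D/L', ['d/l']),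
--              ('Unequal D/L', ['unequal d/l']), ('Others', ['others'])],
--     'core': [('Honeycomb', ['honeycomb']),
--              ('Solid Tubular Core', ['solid', 'tubular', 'core']),
--              ('Solid Timber', ['solid', 'timber']),
--              ('Metal Skeleton', ['metal', 'skeleton'])],
--     'edging': [('NA Lipping', ['na', 'lipping']),
--                ('ABS Edging', ['abs', 'edging']),
--                ('No Edging', ['no', 'edging'])],
--     'decorative': [('T-bar', ['tbar']), ('Groove Line', ['groove line'])],
-- }
--
--
-- def generate_checkbox_group(group_type: str, selected_value: str) -> str:
--     sel = selected_value.lower()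
--     if group_type == 'decorative':
--         sel = sel.replace('-', '')
--     parts = [
--         f"""
--             <div class="checkbox-item">
--                 <div class="{'checkbox checked' if sel and any(n in sel for n in needles) else 'checkbox'}"></div>
--                 <span class="checkbox-label">{label}</span>
--             </div>
--         """
--         for label, needles in _NEEDLE_TABLE.get(group_type, [])
--     ]
--     return '<div class="checkbox-group">' + ''.join(parts) + '</div>'
-- ===== Notes on version B (the rewrite author's own statement) =====
-- stated objective: alternative
-- what changed: Replaces the per-iteration elif-chain and per-option string processing (replace/lower/split recomputed inside the loop) with a precomputed table mapping each group to (label, needle-list) pairs, one upfront normalisation of the selected string, a single uniform any-needle membership test, and a joined list comprehension instead of string +=.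
import Mathlib
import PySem

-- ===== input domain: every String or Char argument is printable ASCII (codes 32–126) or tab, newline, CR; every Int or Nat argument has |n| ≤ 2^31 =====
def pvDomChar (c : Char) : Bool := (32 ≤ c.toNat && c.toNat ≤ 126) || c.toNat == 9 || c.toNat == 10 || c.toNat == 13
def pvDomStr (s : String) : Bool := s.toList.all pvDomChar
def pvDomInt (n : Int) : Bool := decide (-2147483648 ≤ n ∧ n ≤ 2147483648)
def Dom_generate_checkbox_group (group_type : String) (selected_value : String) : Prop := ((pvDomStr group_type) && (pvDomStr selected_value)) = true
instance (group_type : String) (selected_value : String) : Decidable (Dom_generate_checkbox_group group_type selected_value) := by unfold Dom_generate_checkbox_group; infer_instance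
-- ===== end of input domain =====

-- B replaces the per-iteration elif-chain by a precomputed (label, needles) table,
-- one upfront normalisation of the selected string and a joined comprehension ("alternative").


-- ===== PORT A =====
def generate_checkbox_group (group_type : String) (selected_value : String) : String :=
  let checkbox_options : PySem.Dict String (List String) :=
    (((((PySem.Dict.empty).insert "thickness" ["37mm", "43mm", "48mm", "Others"]).insert
        "type" ["S/L", "D/L", "Unequal D/L", "Others"]).insert
        "core" ["Honeycomb", "Solid Tubular Core", "Solid Timber", "Metal Skeleton"]).insert
        "edging" ["NA Lipping", "ABS Edging", "No Edging"]).insert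
        "decorative" ["T-bar", "Groove Line"]
  let options := checkbox_options.getD group_type []
  let selected_lower := PySem.Str.lower selected_value
  let html := "<div class=\"checkbox-group\">"
  let html := options.foldl (fun html option =>
    let is_checked : Bool :=
      if selected_lower ≠ "" then
        if group_type == "thickness" && PySem.Str.isIn (PySem.Str.replace option "mm" "") selected_lower then true
        else if group_type == "type" && PySem.Str.isIn (PySem.Str.lower option) selected_lower then true
        else if group_type == "core" && (PySem.Str.split₀ (PySem.Str.lower option)).any (fun word => PySem.Str.isIn word selected_lower) then true
        else if group_type == "edging" && (PySem.Str.split₀ (PySem.Str.lower option)).any (fun word => PySem.Str.isIn word selected_lower) then true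
        else if group_type == "decorative" && PySem.Str.isIn (PySem.Str.replace (PySem.Str.lower option) "-" "") (PySem.Str.replace selected_lower "-" "") then true
        else false
      else false
    let checkbox_class := if is_checked then "checkbox checked" else "checkbox"
    html ++ ("\n            <div class=\"checkbox-item\">\n                <div class=\"" ++ checkbox_class ++ "\"></div>\n                <span class=\"checkbox-label\">" ++ option ++ "</span>\n            </div>\n        ")) html
  html ++ "</div>"

-- ===== PORT B =====
def pvNeedleTable : PySem.Dict String (List (String × List String)) :=
  (((((PySem.Dict.empty).insert "thickness"
        [("37mm", ["37"]), ("43mm", ["43"]), ("48mm", ["48"]), ("Others", ["Others"])]).insert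
      "type" [("S/L", ["s/l"]), ("D/L", ["d/l"]), ("Unequal D/L", ["unequal d/l"]), ("Others", ["others"])]).insert
      "core" [("Honeycomb", ["honeycomb"]), ("Solid Tubular Core", ["solid", "tubular", "core"]),
              ("Solid Timber", ["solid", "timber"]), ("Metal Skeleton", ["metal", "skeleton"])]).insert
      "edging" [("NA Lipping", ["na", "lipping"]), ("ABS Edging", ["abs", "edging"]),
                ("No Edging", ["no", "edging"])]).insert
      "decorative" [("T-bar", ["tbar"]), ("Groove Line", ["groove line"])]

def generate_checkbox_group_alt (group_type : String) (selected_value : String) : String :=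
  let sel := PySem.Str.lower selected_value
  let sel := if group_type == "decorative" then PySem.Str.replace sel "-" "" else sel
  let parts := (pvNeedleTable.getD group_type []).map (fun p =>
    "\n            <div class=\"checkbox-item\">\n                <div class=\"" ++
      (if sel ≠ "" && p.2.any (fun n => PySem.Str.isIn n sel) then "checkbox checked" else "checkbox") ++
      "\"></div>\n                <span class=\"checkbox-label\">" ++ p.1 ++ "</span>\n            </div>\n        ")
  "<div class=\"checkbox-group\">" ++ PySem.Str.join "" parts ++ "</div>"

-- ===== PRECONDITION & SPEC =====
def Spec_generate_checkbox_group (group_type : String) (selected_value : String) (out : String) : Prop := out = generate_checkbox_group_alt group_type selected_value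
instance (group_type : String) (selected_value : String) (out : String) : Decidable (Spec_generate_checkbox_group group_type selected_value out) := by unfold Spec_generate_checkbox_group; infer_instance

-- ===== CLAIM (what is proved, stated in full; the proofs are below) =====
def Claim_equal_generate_checkbox_group : Prop := ∀ (group_type : String) (selected_value : String), Dom_generate_checkbox_group group_type selected_value → Spec_generate_checkbox_group group_type selected_value (generate_checkbox_group group_type selected_value)


-- ===== LEMMAS AND PROOFS =====

-- A tests truthiness of the selected string BEFORE dash-stripping, B after; for a nonempty
-- needle the overall condition coincides, which this iff states.
lemma pv_decor_guard (sv : String) (n : List Char) (hn : n ≠ []) :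
    ((¬ PySem.Str.lower sv = "") ∧ PySem.Chars.isIn n (PySem.Chars.replace (PySem.Chars.lower sv.toList) ['-'] []) = true)
    ↔ ((¬ PySem.Str.replace (PySem.Str.lower sv) "-" "" = "") ∧ PySem.Chars.isIn n (PySem.Chars.replace (PySem.Chars.lower sv.toList) ['-'] []) = true) := by
  have hbridge : (PySem.Str.replace (PySem.Str.lower sv) "-" "").toList
      = PySem.Chars.replace (PySem.Chars.lower sv.toList) ['-'] [] := by
    simp
  constructor
  · rintro ⟨_, h2⟩
    refine ⟨fun he => ?_, h2⟩
    rw [he] at hbridge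
    rw [← hbridge] at h2
    rw [PySem.Chars.isIn_iff_infix] at h2
    exact hn (List.eq_nil_of_infix_nil h2)
  · rintro ⟨h1, h2⟩
    refine ⟨fun he => ?_, h2⟩
    apply h1
    apply String.toList_inj.mp
    rw [hbridge]
    have : PySem.Chars.lower sv.toList = [] := by
      have := congrArg String.toList he
      simpa using this
    rw [this]
    decide

set_option maxRecDepth 8192 in
lemma pv_case_thickness (sv : String) :
    generate_checkbox_group "thickness" sv = generate_checkbox_group_alt "thickness" sv := by
  apply String.toList_inj.mp
  simp [generate_checkbox_group, generate_checkbox_group_alt, pvNeedleTable,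
    PySem.Dict.getD_insert,
    show PySem.Chars.replace ['3','7','m','m'] ['m','m'] [] = ['3','7'] from by decide,
    show PySem.Chars.replace ['4','3','m','m'] ['m','m'] [] = ['4','3'] from by decide,
    show PySem.Chars.replace ['4','8','m','m'] ['m','m'] [] = ['4','8'] from by decide,
    show PySem.Chars.replace ['O','t','h','e','r','s'] ['m','m'] [] = ['O','t','h','e','r','s'] from by decide,
    PySem.Str.join, PySem.Chars.join, List.intercalate]

set_option maxRecDepth 8192 in
lemma pv_case_type (sv : String) :
    generate_checkbox_group "type" sv = generate_checkbox_group_alt "type" sv := by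
  apply String.toList_inj.mp
  simp [generate_checkbox_group, generate_checkbox_group_alt, pvNeedleTable,
    PySem.Dict.getD_insert,
    show PySem.Chars.lower ['S','/','L'] = ['s','/','l'] from by decide,
    show PySem.Chars.lower ['D','/','L'] = ['d','/','l'] from by decide,
    show PySem.Chars.lower ['U','n','e','q','u','a','l',' ','D','/','L'] = ['u','n','e','q','u','a','l',' ','d','/','l'] from by decide,
    show PySem.Chars.lower ['O','t','h','e','r','s'] = ['o','t','h','e','r','s'] from by decide,
    PySem.Str.join, PySem.Chars.join, List.intercalate]

set_option maxRecDepth 8192 in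
lemma pv_case_core (sv : String) :
    generate_checkbox_group "core" sv = generate_checkbox_group_alt "core" sv := by
  apply String.toList_inj.mp
  simp [generate_checkbox_group, generate_checkbox_group_alt, pvNeedleTable,
    PySem.Dict.getD_insert,
    show PySem.Str.split₀ (PySem.Str.lower "Honeycomb") = ["honeycomb"] from by decide,
    show PySem.Str.split₀ (PySem.Str.lower "Solid Tubular Core") = ["solid","tubular","core"] from by decide,
    show PySem.Str.split₀ (PySem.Str.lower "Solid Timber") = ["solid","timber"] from by decide,
    show PySem.Str.split₀ (PySem.Str.lower "Metal Skeleton") = ["metal","skeleton"] from by decide,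
    PySem.Str.join, PySem.Chars.join, List.intercalate]

set_option maxRecDepth 8192 in
lemma pv_case_edging (sv : String) :
    generate_checkbox_group "edging" sv = generate_checkbox_group_alt "edging" sv := by
  apply String.toList_inj.mp
  simp [generate_checkbox_group, generate_checkbox_group_alt, pvNeedleTable,
    PySem.Dict.getD_insert,
    show PySem.Str.split₀ (PySem.Str.lower "NA Lipping") = ["na","lipping"] from by decide,
    show PySem.Str.split₀ (PySem.Str.lower "ABS Edging") = ["abs","edging"] from by decide,
    show PySem.Str.split₀ (PySem.Str.lower "No Edging") = ["no","edging"] from by decide,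
    PySem.Str.join, PySem.Chars.join, List.intercalate]

set_option maxRecDepth 8192 in
lemma pv_case_decorative (sv : String) :
    generate_checkbox_group "decorative" sv = generate_checkbox_group_alt "decorative" sv := by
  apply String.toList_inj.mp
  simp [generate_checkbox_group, generate_checkbox_group_alt, pvNeedleTable,
    show PySem.Chars.replace (PySem.Chars.lower ['T','-','b','a','r']) ['-'] [] = ['t','b','a','r'] from by decide,
    show PySem.Chars.replace (PySem.Chars.lower ['G','r','o','o','v','e',' ','L','i','n','e']) ['-'] [] = ['g','r','o','o','v','e',' ','l','i','n','e'] from by decide,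
    pv_decor_guard sv ['t','b','a','r'] (by decide),
    pv_decor_guard sv ['g','r','o','o','v','e',' ','l','i','n','e'] (by decide),
    PySem.Str.join, PySem.Chars.join, List.intercalate]

lemma pv_case_default (g sv : String) (h1 : g ≠ "thickness") (h2 : g ≠ "type") (h3 : g ≠ "core")
    (h4 : g ≠ "edging") (h5 : g ≠ "decorative") :
    generate_checkbox_group g sv = generate_checkbox_group_alt g sv := by
  apply String.toList_inj.mp
  simp [generate_checkbox_group, generate_checkbox_group_alt, pvNeedleTable,
    PySem.Dict.getD_insert, PySem.Dict.getD_empty, h1, h2, h3, h4, h5,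
    PySem.Str.join, PySem.Chars.join, List.intercalate]

-- ===== VERDICT (by name: the statement is the Claim_ definition above) =====
theorem generate_checkbox_group_spec : Claim_equal_generate_checkbox_group := by
  intro g sv _
  unfold Spec_generate_checkbox_group
  by_cases h1 : g = "thickness"
  · subst h1; exact pv_case_thickness sv
  by_cases h2 : g = "type"
  · subst h2; exact pv_case_type sv
  by_cases h3 : g = "core"
  · subst h3; exact pv_case_core sv
  by_cases h4 : g = "edging"
  · subst h4; exact pv_case_edging sv
  by_cases h5 : g = "decorative"
  · subst h5; exact pv_case_decorative sv
  exact pv_case_default g sv h1 h2 h3 h4 h5
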